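-- pv_equiv track=rewrite | github.com/DMamrenko/Kattis-Problems | card_trick.py | getNumericalOrder
-- ===== SOURCE A (Python) =====
-- master_string = 'abcdefghijklm'
--
-- def getNumericalOrder(order):
--     result = [0]*len(order)
--     letters = master_string[0:len(order)]
--     for i in range(len(letters)):
--         for j in order:
--             if letters[i]==j:
--                 result[i] = order.index(j)+1
--     return result
-- ===== SOURCE B (Python) =====
-- master_string = 'abcdefghijklm'
--
-- def getNumericalOrder(order):
--     L = len(master_string[0:len(order)])
--     result = [0]*len(order)
--     for pos, char in enumerate(order):
--         idx = ord(char) - ord('a')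
--         if 0 <= idx < L and result[idx] == 0:
--             result[idx] = pos + 1
--     return result
-- ===== Notes on version B (the rewrite author's own statement) =====
-- stated objective: faster
-- what changed: Replaces the letter-by-letter rescan (for each of the first 13 letters, scan all of order and call order.index on each match) with a single enumerate pass over order that scatters each character's first position into its slot.
import Mathlib
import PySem

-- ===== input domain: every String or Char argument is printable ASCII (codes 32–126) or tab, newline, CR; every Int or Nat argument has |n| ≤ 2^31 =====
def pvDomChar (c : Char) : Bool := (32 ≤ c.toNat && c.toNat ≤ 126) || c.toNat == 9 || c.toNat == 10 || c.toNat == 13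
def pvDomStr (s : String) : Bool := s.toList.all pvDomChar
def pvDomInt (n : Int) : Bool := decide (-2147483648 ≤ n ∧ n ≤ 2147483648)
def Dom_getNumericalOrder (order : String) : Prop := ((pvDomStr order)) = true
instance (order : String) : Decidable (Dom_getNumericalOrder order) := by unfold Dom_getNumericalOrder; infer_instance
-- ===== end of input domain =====

-- B replaces A's letter-by-letter rescan of `order` (with order.index per match) by a single
-- enumerate pass scattering each character's first position into its slot (objective: faster).


-- ===== PORT A =====
def masterChars : List Char := "abcdefghijklm".toList

def getNumericalOrder (order : String) : List Int :=
  let cs := order.toList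
  let result : List Int := List.replicate cs.length 0
  let letters := PySem.List.slice masterChars (some (0 : Int)) (some (cs.length : Int))
  (List.range letters.length).foldl
    (fun res i =>
      cs.foldl
        (fun res j =>
          if letters.getD i ' ' = j then
            res.set i ((((PySem.List.index? cs j).getD 0 + 1 : Nat) : Int))
          else res)
        res)
    result

-- ===== PORT B =====
def getNumericalOrder_alt (order : String) : List Int :=
  let cs := order.toList
  let L := (PySem.List.slice masterChars (some (0 : Int)) (some (cs.length : Int))).length
  (PySem.List.enumerate cs 0).foldl
    (fun res p =>
      let idx : Int := (p.2.toNat : Int) - 97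
      if 0 ≤ idx ∧ idx < (L : Int) ∧ res.getD idx.toNat 0 = 0 then
        res.set idx.toNat (p.1 + 1)
      else res)
    (List.replicate cs.length 0)

-- ===== PRECONDITION & SPEC =====
def Spec_getNumericalOrder (order : String) (out : List Int) : Prop := out = getNumericalOrder_alt order
instance (order : String) (out : List Int) : Decidable (Spec_getNumericalOrder order out) := by unfold Spec_getNumericalOrder; infer_instance

-- ===== CLAIM (what is proved, stated in full; the proofs are below) =====
def Claim_equal_getNumericalOrder : Prop := ∀ (order : String), Dom_getNumericalOrder order → Spec_getNumericalOrder order (getNumericalOrder order)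

-- ===== LEMMAS AND PROOFS =====

-- the k-th master letter
def mc (k : Nat) : Char := Char.ofNat (97 + k)

lemma char_eq_of_toNat_eq {c d : Char} (h : c.toNat = d.toNat) : c = d :=
  Char.ext (UInt32.toNat_inj.mp h)

lemma mc_toNat : ∀ k, k < 13 → (mc k).toNat = 97 + k := by decide

-- first position (1-based) written by B's scatter pass, as found in the pair list
def gB (k : Nat) (ps : List (Int × Char)) : Int :=
  match ps.find? (fun p => p.2.toNat == 97 + k) with
  | some p => p.1 + 1
  | none => 0

-- ----- A side -----

lemma inner_fold (c : Char) (i : Nat) (wf : Char → Int) :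
    ∀ (l : List Char) (res : List Int),
      List.foldl (fun res j => if c = j then res.set i (wf j) else res) res l
        = if c ∈ l then res.set i (wf c) else res := by
  intro l
  induction l with
  | nil => intro res; simp
  | cons j l ih =>
    intro res
    by_cases hcj : c = j
    · subst hcj
      simp only [List.foldl_cons, ih, List.mem_cons]
      simp
    · simp only [List.foldl_cons, if_neg hcj, ih, List.mem_cons]
      have : (c ∈ j :: l) = (c ∈ l) := by simp [List.mem_cons, hcj]
      simp [hcj]

lemma outer_fold_length (P : Nat → Prop) [DecidablePred P] (w : Nat → Int) :
    ∀ (m : Nat) (res : List Int),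
      ((List.range m).foldl (fun r i => if P i then r.set i (w i) else r) res).length
        = res.length := by
  intro m
  induction m with
  | zero => intro res; simp
  | succ m ih =>
    intro res
    rw [List.range_succ, List.foldl_append]
    simp only [List.foldl_cons, List.foldl_nil]
    split_ifs <;> simp [ih]

lemma outer_fold (P : Nat → Prop) [DecidablePred P] (w : Nat → Int) (k : Nat) :
    ∀ (m : Nat) (res : List Int),
      ((List.range m).foldl (fun r i => if P i then r.set i (w i) else r) res)[k]?
        = if k < m ∧ P k ∧ k < res.length then some (w k) else res[k]? := by
  intro m
  induction m with
  | zero => intro res; simp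
  | succ m ih =>
    intro res
    rw [List.range_succ, List.foldl_append]
    simp only [List.foldl_cons, List.foldl_nil]
    have hlen := outer_fold_length P w m res
    by_cases hPm : P m
    · rw [if_pos hPm, List.getElem?_set, hlen]
      by_cases hmk : m = k
      · rw [if_pos hmk]
        subst hmk
        by_cases hkl : m < res.length
        · simp [hkl, hPm]
        · simp [hkl]
      · rw [if_neg hmk, ih]
        by_cases hkm : k < m
        · simp [hkm, show k < m + 1 by omega]
        · have hkm1 : ¬ (k < m + 1) := by omega
          simp [hkm, hkm1]
    · rw [if_neg hPm, ih]
      by_cases hkm : k < m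
      · simp [hkm, show k < m + 1 by omega]
      · by_cases hkm2 : k < m + 1
        · have : k = m := by omega
          subst this
          simp [hkm2, hPm]
        · simp [hkm, hkm2]

-- ----- B side -----

lemma bfold_length (L : Nat) :
    ∀ (ps : List (Int × Char)) (res : List Int),
      (ps.foldl
        (fun res p =>
          let idx : Int := (p.2.toNat : Int) - 97
          if 0 ≤ idx ∧ idx < (L : Int) ∧ res.getD idx.toNat 0 = 0 then
            res.set idx.toNat (p.1 + 1)
          else res) res).length = res.length := by
  intro ps
  induction ps with
  | nil => intro res; simp
  | cons p ps ih =>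
    intro res
    rw [List.foldl_cons, ih]
    dsimp only
    split_ifs <;> simp


lemma bfold (L k : Nat) :
    ∀ (ps : List (Int × Char)) (res : List Int), (∀ p ∈ ps, 0 ≤ p.1) → k < res.length →
      (ps.foldl
        (fun res p =>
          let idx : Int := (p.2.toNat : Int) - 97
          if 0 ≤ idx ∧ idx < (L : Int) ∧ res.getD idx.toNat 0 = 0 then
            res.set idx.toNat (p.1 + 1)
          else res) res)[k]?
        = if k < L ∧ res.getD k 0 = 0 then some (gB k ps) else res[k]? := by
  intro ps
  induction ps with
  | nil =>
    intro res _ hkl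
    simp only [List.foldl_nil, gB, List.find?_nil]
    by_cases h : k < L ∧ res.getD k 0 = 0
    · rw [if_pos h, List.getElem?_eq_getElem hkl, List.getD_eq_getElem?_getD, List.getElem?_eq_getElem hkl] at *
      simp_all
    · rw [if_neg h]
  | cons p ps ih =>
    intro res hpos hkl
    simp only [List.foldl_cons]
    by_cases hc : p.2.toNat = 97 + k
    · -- this pair targets slot k
      have hidx : ((p.2.toNat : Int) - 97).toNat = k := by omega
      have hgB : gB k (p :: ps) = p.1 + 1 := by
        simp [gB, hc]
      by_cases hcond : k < L ∧ res.getD k 0 = 0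
      · have hguard : 0 ≤ (p.2.toNat : Int) - 97 ∧ ((p.2.toNat : Int) - 97) < (L : Int) ∧ res.getD ((p.2.toNat : Int) - 97).toNat 0 = 0 := by
          refine ⟨by omega, by omega, by rw [hidx]; exact hcond.2⟩
        rw [if_pos hguard]
        rw [hidx]
        have hset : (res.set k (p.1 + 1)).getD k 0 = p.1 + 1 := by
          rw [List.getD_eq_getElem?_getD, List.getElem?_set_self (by omega), Option.getD_some]
        have hne : ¬ ((res.set k (p.1 + 1)).getD k 0 = 0) := by
          rw [hset]; have := hpos p (by simp); omega
        rw [ih (res.set k (p.1 + 1)) (fun q hq => hpos q (by simp [hq])) (by simpa using hkl)]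
        rw [if_neg (by tauto)]
        rw [List.getElem?_set_self (by omega), if_pos hcond, hgB]
      · -- guard fails
        have hguard : ¬ (0 ≤ (p.2.toNat : Int) - 97 ∧ ((p.2.toNat : Int) - 97) < (L : Int) ∧ res.getD ((p.2.toNat : Int) - 97).toNat 0 = 0) := by
          rw [hidx]
          intro ⟨h1, h2, h3⟩
          exact hcond ⟨by omega, h3⟩
        rw [if_neg hguard]
        rw [ih res (fun q hq => hpos q (by simp [hq])) hkl, if_neg hcond, if_neg hcond]
    · -- this pair does not target slot k
      have hgB : gB k (p :: ps) = gB k ps := by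
        simp [gB, hc]
      by_cases hguard : 0 ≤ (p.2.toNat : Int) - 97 ∧ ((p.2.toNat : Int) - 97) < (L : Int) ∧ res.getD ((p.2.toNat : Int) - 97).toNat 0 = 0
      · rw [if_pos hguard]
        have hne : ((p.2.toNat : Int) - 97).toNat ≠ k := by omega
        have hset : (res.set ((p.2.toNat : Int) - 97).toNat (p.1 + 1)).getD k 0 = res.getD k 0 := by
          rw [List.getD_eq_getElem?_getD, List.getElem?_set_ne hne, ← List.getD_eq_getElem?_getD]
        rw [ih _ (fun q hq => hpos q (by simp [hq])) (by simpa using hkl), hset, hgB,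
          List.getElem?_set_ne hne]
      · rw [if_neg hguard]
        rw [ih res (fun q hq => hpos q (by simp [hq])) hkl, hgB]

lemma gB_enumerate (k : Nat) (hk : k < 13) :
    ∀ (cs : List Char) (s : Int),
      (PySem.List.enumerate cs s).find? (fun p => p.2.toNat == 97 + k)
        = (PySem.List.index? cs (mc k)).map (fun m => (s + (m : Int), mc k)) := by
  intro cs
  induction cs with
  | nil => intro s; simp [PySem.List.enumerate_nil, PySem.List.index?_eq_idxOf?]
  | cons c cs ih =>
    intro s
    rw [PySem.List.enumerate_cons, List.find?_cons]
    by_cases hc : c.toNat = 97 + k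
    · have hcm : c = mc k := char_eq_of_toNat_eq (by rw [hc, mc_toNat k hk])
      have hb : ((s, c).2.toNat == 97 + k) = true := by simp [hc]
      rw [hb, hcm, PySem.List.index?_cons_self]
      simp
    · have hcm : c ≠ mc k := fun h => hc (by rw [h, mc_toNat k hk])
      have hb : ((s, c).2.toNat == 97 + k) = false := by simp [hc]
      rw [hb, ih (s + 1), PySem.List.index?_cons_of_ne cs hcm]
      cases h : PySem.List.index? cs (mc k) with
      | none => simp
      | some m =>
        simp [Prod.ext_iff]
        ring

lemma master_getD : ∀ k, k < 13 → masterChars.getD k ' ' = mc k := by decide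

lemma master_length : masterChars.length = 13 := by decide

theorem ab_eq (order : String) : getNumericalOrder order = getNumericalOrder_alt order := by
  unfold getNumericalOrder getNumericalOrder_alt
  dsimp only
  have hslice : PySem.List.slice masterChars (some (0 : Int)) (some (order.toList.length : Int))
      = masterChars.take order.toList.length := by
    simp [PySem.List.slice_zero_start, PySem.List.slice_to_natCast]
  rw [hslice]
  simp only [inner_fold]
  apply List.ext_getElem?
  intro k
  rw [outer_fold]
  by_cases hk : k < order.toList.length
  · -- in-range index
    have hpos : ∀ p ∈ PySem.List.enumerate order.toList 0, 0 ≤ p.1 := by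
      intro p hp
      rw [PySem.List.mem_enumerate_iff] at hp
      obtain ⟨k', hk', rfl⟩ := hp
      simp
    have hklen : k < (List.replicate order.toList.length (0 : Int)).length := by
      simpa using hk
    rw [bfold ((masterChars.take order.toList.length).length) k
        (PySem.List.enumerate order.toList 0) _ hpos hklen]
    have hL : (masterChars.take order.toList.length).length = min order.toList.length 13 := by
      rw [List.length_take, master_length]
    have hrep0 : (List.replicate order.toList.length (0 : Int)).getD k 0 = 0 := by
      rw [List.getD_eq_getElem?_getD, List.getElem?_replicate]
      split <;> simp
    have hrepk : (List.replicate order.toList.length (0 : Int))[k]? = some 0 := by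
      rw [List.getElem?_replicate, if_pos hk]
    rw [hrep0, hrepk]
    by_cases hkL : k < (masterChars.take order.toList.length).length
    · have hk13 : k < 13 := by omega
      have hPk : (masterChars.take order.toList.length).getD k ' ' = mc k := by
        rw [List.getD_eq_getElem?_getD, List.getElem?_take, if_pos hk,
          ← List.getD_eq_getElem?_getD]
        exact master_getD k hk13
      rw [hPk]
      by_cases hmem : mc k ∈ order.toList
      · obtain ⟨m, hm⟩ := Option.isSome_iff_exists.mp
          ((PySem.List.index?_isSome_iff order.toList (mc k)).mpr hmem)
        rw [if_pos ⟨hkL, hmem, hklen⟩, if_pos ⟨hkL, rfl⟩]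
        unfold gB
        rw [gB_enumerate k hk13 order.toList 0, hm]
        simp
      · have hnone : PySem.List.index? order.toList (mc k) = none :=
          (PySem.List.index?_eq_none_iff order.toList (mc k)).mpr hmem
        rw [if_neg (by tauto), if_pos ⟨hkL, rfl⟩]
        unfold gB
        rw [gB_enumerate k hk13 order.toList 0, hnone]
        simp
    · rw [if_neg (by tauto), if_neg (by tauto)]
  · -- out of range: both sides are none
    have hk2 : ¬ k < order.length := by simpa using hk
    rw [if_neg (by simp; omega)]
    have hlenB : (List.foldl
        (fun res p =>
          let idx : Int := (p.2.toNat : Int) - 97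
          if 0 ≤ idx ∧ idx < ((masterChars.take order.toList.length).length : Int) ∧
              res.getD idx.toNat 0 = 0 then
            res.set idx.toNat (p.1 + 1)
          else res)
        (List.replicate order.toList.length (0 : Int))
        (PySem.List.enumerate order.toList 0)).length = order.toList.length := by
      rw [bfold_length]
      simp
    rw [List.getElem?_eq_none (by simp; omega),
      List.getElem?_eq_none (by rw [hlenB]; omega)]

-- ===== VERDICT (by name: the statement is the Claim_ definition above) =====
theorem getNumericalOrder_spec : Claim_equal_getNumericalOrder := by
  intro order _
  unfold Spec_getNumericalOrder
  exact ab_eq order
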